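-- pv_equiv track=rewrite | github.com/merkit5/rush-hour | backend/generator.py | would_block_red_exit
-- ===== SOURCE A (Python) =====
-- FIELD_WIDTH = 6
--
-- RED_ROW = 2  # 0-based index (3rd row)
--
-- RED_LENGTH = 2
--
-- def would_block_red_exit(field, positions, orientation):
--     """Check if placing this car would block red car's exit path"""
--     red_pos = field.index('A')
--     red_x = red_pos % FIELD_WIDTH
--     exit_path = range(red_x + RED_LENGTH, FIELD_WIDTH)
--
--     if orientation == 'h' and positions[0] // FIELD_WIDTH == RED_ROW:
--         car_x_start = positions[0] % FIELD_WIDTH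
--         car_x_end = positions[-1] % FIELD_WIDTH
--         return any(car_x_start <= x <= car_x_end for x in exit_path)
--     return False
-- ===== SOURCE B (Python) =====
-- FIELD_WIDTH = 6
--
-- RED_ROW = 2
--
-- RED_LENGTH = 2
--
-- def would_block_red_exit(field, positions, orientation):
--     """Check if placing this car would block red car's exit path.
--
--     Single boolean conjunction: since column indices are always in 0..5,
--     the car overlaps the exit corridor [red_x+RED_LENGTH, 5] exactly when
--     its column interval is nonempty and its right end reaches the corridor.
--     """
--     red_x = field.index('A') % FIELD_WIDTH
--     return (orientation == 'h'
--             and positions[0] // FIELD_WIDTH == RED_ROW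
--             and positions[0] % FIELD_WIDTH <= positions[-1] % FIELD_WIDTH
--             and red_x + RED_LENGTH <= positions[-1] % FIELD_WIDTH)
-- ===== Notes on version B (the rewrite author's own statement) =====
-- stated objective: simpler
-- what changed: Replaces building the exit-path range and scanning it with any() by a single guard-free boolean conjunction: the car interval is nonempty and its right endpoint reaches red_x+RED_LENGTH (valid because column indices are always 0..5).
import Mathlib
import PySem

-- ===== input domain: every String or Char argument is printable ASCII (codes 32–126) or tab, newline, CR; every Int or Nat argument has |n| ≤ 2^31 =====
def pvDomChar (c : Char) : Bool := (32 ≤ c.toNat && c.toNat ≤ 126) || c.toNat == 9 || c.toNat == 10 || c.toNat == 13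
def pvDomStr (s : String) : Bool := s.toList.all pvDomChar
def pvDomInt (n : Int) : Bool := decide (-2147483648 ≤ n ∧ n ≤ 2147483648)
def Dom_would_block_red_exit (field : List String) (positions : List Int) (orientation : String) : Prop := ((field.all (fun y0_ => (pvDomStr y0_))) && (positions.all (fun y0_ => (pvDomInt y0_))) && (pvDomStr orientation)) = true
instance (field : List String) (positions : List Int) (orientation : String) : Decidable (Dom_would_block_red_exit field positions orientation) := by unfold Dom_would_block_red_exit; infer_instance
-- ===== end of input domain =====

-- B replaces the exit-path range scan and branches by one boolean conjunction (objective: simpler).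
-- ===== PORT A =====
def would_block_red_exit (field : List String) (positions : List Int) (orientation : String) : Bool :=
  match PySem.List.index? field "A" with
  | none => false  -- ValueError from field.index('A'); excluded by Pre_
  | some red_pos =>
    let red_x : Int := PySem.Int.mod (red_pos : Int) 6
    let exit_path := PySem.List.pyRange (red_x + 2) 6 1
    if orientation == "h" then
      match PySem.List.pyGet? positions 0 with
      | none => false  -- IndexError positions[0]; excluded by Pre_
      | some p0 =>
        if PySem.Int.floordiv p0 6 == 2 then
          match PySem.List.pyGet? positions (-1) with
          | none => false  -- IndexError positions[-1]; excluded by Pre_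
          | some plast =>
            let car_x_start := PySem.Int.mod p0 6
            let car_x_end := PySem.Int.mod plast 6
            exit_path.any (fun x => decide (car_x_start ≤ x) && decide (x ≤ car_x_end))
        else false
    else false

-- ===== PORT B =====
-- Option-chained transcription of Source B's single return expression (short-circuit
-- `and` chain; a missing element yields `none`, i.e. the inputs Pre_ excludes).
def would_block_red_exit_alt (field : List String) (positions : List Int) (orientation : String) : Bool :=
  (((PySem.List.index? field "A").bind fun i =>
      (PySem.List.pyGet? positions 0).bind fun p0 =>
        (PySem.List.pyGet? positions (-1)).map fun plast =>
          orientation == "h"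
            && PySem.Int.floordiv p0 6 == 2
            && decide (PySem.Int.mod p0 6 ≤ PySem.Int.mod plast 6)
            && decide (PySem.Int.mod (i : Int) 6 + 2 ≤ PySem.Int.mod plast 6))).getD false

-- ===== PRECONDITION & SPEC =====
-- Pre_ excludes exactly the inputs where Python A raises: ValueError when 'A' is absent from
-- field, IndexError when orientation == 'h' and positions is empty.
def Pre_would_block_red_exit (field : List String) (positions : List Int) (orientation : String) : Prop :=
  "A" ∈ field ∧ (orientation = "h" → positions ≠ [])
instance (field : List String) (positions : List Int) (orientation : String) : Decidable (Pre_would_block_red_exit field positions orientation) := by unfold Pre_would_block_red_exit; infer_instance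
def pvWitness_would_block_red_exit : List String × List Int × String := (["BB", "A"], [12, 13], "h")
def Spec_would_block_red_exit (field : List String) (positions : List Int) (orientation : String) (out : Bool) : Prop := out = would_block_red_exit_alt field positions orientation
instance (field : List String) (positions : List Int) (orientation : String) (out : Bool) : Decidable (Spec_would_block_red_exit field positions orientation out) := by unfold Spec_would_block_red_exit; infer_instance

-- ===== CLAIM (what is proved, stated in full; the proofs are below) =====
def Claim_equal_would_block_red_exit : Prop := ∀ (field : List String) (positions : List Int) (orientation : String), Dom_would_block_red_exit field positions orientation → Pre_would_block_red_exit field positions orientation → Spec_would_block_red_exit field positions orientation (would_block_red_exit field positions orientation)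

-- ===== LEMMAS AND PROOFS =====

-- a scan of [a, 6) for a point of [s, e] is the same as: [s,e] nonempty and e reaches a — given e < 6
lemma any_pyRange_iff (a s e : Int) (he : e < 6) :
    ((PySem.List.pyRange a 6 1).any (fun x => decide (s ≤ x) && decide (x ≤ e)))
      = (decide (s ≤ e) && decide (a ≤ e)) := by
  by_cases h : s ≤ e ∧ a ≤ e
  · have hmem : max s a ∈ PySem.List.pyRange a 6 1 := by
      rw [PySem.List.mem_pyRange_one]; omega
    have : (PySem.List.pyRange a 6 1).any (fun x => decide (s ≤ x) && decide (x ≤ e)) = true := by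
      rw [List.any_eq_true]
      exact ⟨max s a, hmem, by simp; omega⟩
    simp [this, h.1, h.2]
  · have : (PySem.List.pyRange a 6 1).any (fun x => decide (s ≤ x) && decide (x ≤ e)) = false := by
      rw [List.any_eq_false]
      intro x hx
      rw [PySem.List.mem_pyRange_one] at hx
      simp; omega
    rw [this]
    rcases not_and_or.mp h with h' | h' <;> simp [h']

-- ===== VERDICT (by name: the statement is the Claim_ definition above) =====
theorem would_block_red_exit_spec : Claim_equal_would_block_red_exit := by
  intro field positions orientation _ hpre
  unfold Spec_would_block_red_exit would_block_red_exit would_block_red_exit_alt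
  obtain ⟨hA, hne⟩ := hpre
  obtain ⟨i, hi⟩ := Option.isSome_iff_exists.mp
    ((PySem.List.index?_isSome_iff field "A").mpr hA)
  rw [hi]
  by_cases ho : orientation = "h"
  · subst ho
    obtain ⟨p0, h0⟩ := Option.isSome_iff_exists.mp (show (PySem.List.pyGet? positions 0).isSome by
      cases positions with
      | nil => exact absurd rfl (hne rfl)
      | cons x xs => simp)
    obtain ⟨pl, h1⟩ := Option.isSome_iff_exists.mp (show (PySem.List.pyGet? positions (-1)).isSome by
      rw [PySem.List.pyGet?_neg_one]; simp [List.getLast?_isSome, hne rfl])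
    rw [h0, h1]
    simp only [Option.bind_some, Option.map_some, Option.getD_some, beq_self_eq_true,
      Bool.true_and, if_true]
    by_cases hf : PySem.Int.floordiv p0 6 = 2
    · rw [if_pos (by rw [beq_iff_eq]; exact hf), hf]
      simp only [beq_self_eq_true, Bool.true_and]
      exact any_pyRange_iff _ _ _ (PySem.Int.mod_lt pl (by norm_num))
    · rw [if_neg (by rw [beq_iff_eq]; exact hf)]
      rw [PySem.Int.floordiv_eq_ediv_of_pos (by norm_num : (0:Int) < 6)] at hf
      simp [hf]
  · cases h0 : PySem.List.pyGet? positions 0 with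
    | none => simp [ho]
    | some p0 =>
      cases h1 : PySem.List.pyGet? positions (-1) with
      | none => simp [ho]
      | some pl => simp [ho]
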